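-- pv_equiv track=rewrite | github.com/yogthos/cognitive-hydraulics | src/cognitive_hydraulics/utils/context_manager.py | _truncate_to_lines
-- ===== SOURCE A (Python) =====
-- def _truncate_to_lines(code: str, max_chars: int) -> str:
--     """Truncate code to approximately max_chars, preserving line boundaries."""
--     lines = code.split("\n")
--     result_lines = []
--     current_length = 0
--
--     for line in lines:
--         line_length = len(line) + 1  # +1 for newline
--         if current_length + line_length > max_chars:
--             result_lines.append("... (truncated)")
--             break
--         result_lines.append(line)
--         current_length += line_length
--
--     return "\n".join(result_lines)
-- ===== SOURCE B (Python) =====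
-- def _truncate_to_lines(code: str, max_chars: int) -> str:
--     """Truncate code to approximately max_chars, preserving line boundaries."""
--     lines = code.split("\n")
--     # cumulative character counts (each line counts len+1 for its newline)
--     totals = []
--     t = 0
--     for line in lines:
--         t += len(line) + 1
--         totals.append(t)
--     # first index whose cumulative total exceeds the budget
--     cut = next((k for k, total in enumerate(totals) if total > max_chars), None)
--     if cut is None:
--         return "\n".join(lines)
--     return "\n".join(lines[:cut] + ["... (truncated)"])
-- ===== Notes on version B (the rewrite author's own statement) =====
-- stated objective: alternative
-- what changed: Replaces A's single accumulate-append-and-break loop with a cumulative-length table built first, then a separate search for the first prefix sum exceeding max_chars, and a slice lines[:cut] instead of incremental appends.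
import Mathlib
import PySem

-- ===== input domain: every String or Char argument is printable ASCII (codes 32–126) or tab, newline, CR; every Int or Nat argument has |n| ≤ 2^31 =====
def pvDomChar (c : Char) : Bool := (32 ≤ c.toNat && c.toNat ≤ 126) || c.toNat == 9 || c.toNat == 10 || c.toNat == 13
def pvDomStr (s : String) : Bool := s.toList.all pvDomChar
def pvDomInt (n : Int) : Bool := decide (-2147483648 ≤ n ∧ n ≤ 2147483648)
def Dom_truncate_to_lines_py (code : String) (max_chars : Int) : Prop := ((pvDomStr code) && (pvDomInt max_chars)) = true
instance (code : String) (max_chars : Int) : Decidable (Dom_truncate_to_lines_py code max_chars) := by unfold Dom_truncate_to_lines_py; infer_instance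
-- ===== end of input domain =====

-- B builds the cumulative line-length table first and searches it in a second pass, instead of A's single accumulate-and-break loop; alternative decomposition, same cost.


-- ===== PORT A =====
-- A's loop: accumulate current_length, append each line, on overflow append the marker and break.
def truncAuxA (max_chars : Int) : List String → Int → List String
  | [], _ => []
  | line :: rest, current_length =>
    let line_length : Int := PySem.Str.len line + 1
    if current_length + line_length > max_chars then ["... (truncated)"]
    else line :: truncAuxA max_chars rest (current_length + line_length)

def truncate_to_lines_py (code : String) (max_chars : Int) : String :=
  let lines := (PySem.Str.split? code "\n").getD []
  PySem.Str.join "\n" (truncAuxA max_chars lines 0)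

-- ===== PORT B =====
-- B's first loop: the cumulative totals table (t += len(line)+1; totals.append(t)).
def truncTotalsB (t : Int) : List String → List Int
  | [] => []
  | line :: rest =>
    let t' := t + (PySem.Str.len line + 1)
    t' :: truncTotalsB t' rest

def truncate_to_lines_py_alt (code : String) (max_chars : Int) : String :=
  let lines := (PySem.Str.split? code "\n").getD []
  let totals := truncTotalsB 0 lines
  match totals.findIdx? (fun total => total > max_chars) with
  | none => PySem.Str.join "\n" lines
  | some cut => PySem.Str.join "\n" (lines.take cut ++ ["... (truncated)"])

-- ===== PRECONDITION & SPEC =====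
def Spec_truncate_to_lines_py (code : String) (max_chars : Int) (out : String) : Prop := out = truncate_to_lines_py_alt code max_chars
instance (code : String) (max_chars : Int) (out : String) : Decidable (Spec_truncate_to_lines_py code max_chars out) := by unfold Spec_truncate_to_lines_py; infer_instance

-- ===== CLAIM (what is proved, stated in full; the proofs are below) =====
def Claim_equal_truncate_to_lines_py : Prop := ∀ (code : String) (max_chars : Int), Dom_truncate_to_lines_py code max_chars → Spec_truncate_to_lines_py code max_chars (truncate_to_lines_py code max_chars)

-- ===== LEMMAS AND PROOFS =====

-- A's break-loop equals a search of B's prefix-sum table, for any starting running length t.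
theorem truncAuxA_eq_search (max_chars : Int) (lines : List String) (t : Int) :
    truncAuxA max_chars lines t =
      match (truncTotalsB t lines).findIdx? (fun total => total > max_chars) with
      | none => lines
      | some cut => lines.take cut ++ ["... (truncated)"] := by
  induction lines generalizing t with
  | nil => simp [truncAuxA, truncTotalsB]
  | cons line rest ih =>
    simp only [truncAuxA, truncTotalsB, List.findIdx?_cons]
    by_cases h : max_chars < t + (PySem.Str.len line + 1)
    · simp only [PySem.Str.len, String.length_toList] at h
      simp [h]
    · simp only [PySem.Str.len, String.length_toList] at h
      simp only [ih]
      cases hfi : (truncTotalsB (t + (PySem.Str.len line + 1)) rest).findIdx?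
          (fun total => decide (total > max_chars)) with
      | none => simp [h]
      | some k => simp [h, List.take_succ_cons]

-- ===== VERDICT (by name: the statement is the Claim_ definition above) =====
theorem truncate_to_lines_py_spec : Claim_equal_truncate_to_lines_py := by
  intro code max_chars _
  unfold Spec_truncate_to_lines_py truncate_to_lines_py truncate_to_lines_py_alt
  dsimp only
  rw [truncAuxA_eq_search]
  cases hfi : (truncTotalsB 0 ((PySem.Str.split? code "\n").getD [])).findIdx?
      (fun total => total > max_chars) <;> simp
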